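-- pv_equiv track=rewrite | github.com/lejaeyun/Praogramers | SKILL TEST/LV 1/알파벳 정렬.py | solution
-- ===== SOURCE A (Python) =====
-- def solution(s):
--     answer = ''
--     li = list()
--     for ss in s :
--         li.append([ord(ss),ss])
--     li.sort(reverse = True)
--     for ss in li :
--         answer += ss[1]
--     return answer
-- ===== SOURCE B (Python) =====
-- def solution(s):
--     if not s:
--         return ''
--     counts = {}
--     for ch in s:
--         o = ord(ch)
--         counts[o] = counts.get(o, 0) + 1
--     hi = max(counts)
--     lo = min(counts)
--     out = []
--     for o in range(hi, lo - 1, -1):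
--         out.append(chr(o) * counts.get(o, 0))
--     return ''.join(out)
-- ===== Notes on version B (the rewrite author's own statement) =====
-- stated objective: faster
-- what changed: Replaces A's comparison sort of [ord, ch] pairs with a counting sort: one pass builds a code-point frequency dict, then a single descending scan from max to min code emits each character repeated its count.
import Mathlib
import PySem

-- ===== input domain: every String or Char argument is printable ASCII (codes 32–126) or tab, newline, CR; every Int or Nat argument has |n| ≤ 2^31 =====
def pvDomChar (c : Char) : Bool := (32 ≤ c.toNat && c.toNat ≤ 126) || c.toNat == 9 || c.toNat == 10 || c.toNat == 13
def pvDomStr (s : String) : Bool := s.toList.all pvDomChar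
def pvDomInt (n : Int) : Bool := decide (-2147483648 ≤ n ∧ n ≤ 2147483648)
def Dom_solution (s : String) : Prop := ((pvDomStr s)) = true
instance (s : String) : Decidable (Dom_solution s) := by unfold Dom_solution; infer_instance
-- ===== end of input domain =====

-- B replaces A's comparison sort of [ord, ch] pairs by a counting sort over the code points present (one counting
-- pass, then a descending scan of the code range); objective: faster on long strings.

-- ===== PORT A =====
-- Python strings are ported as List Char while being built; String.mk at the end (exact for ASCII concatenation).
def solution (s : String) : String :=
  let li : List (Int × Char) :=
    s.toList.foldl (fun acc c => acc ++ [(((c.toNat : Int)), c)]) []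
  let li2 := PySem.List.sorted2 li (fun p => p.1) (fun p => p.2) true
  String.mk (li2.foldl (fun acc p => acc ++ [p.2]) [])

-- ===== PORT B =====
-- chr(o) is ported as Char.ofNat o.toNat: exact here since every o scanned satisfies 0 ≤ lo ≤ o ≤ hi ≤ 0x10FFFF
-- with lo, hi code points of characters of s.
def solution_alt (s : String) : String :=
  if s.toList = [] then "" else
  let counts : PySem.Dict Int Int :=
    s.toList.foldl (fun d c => d.insert ((c.toNat : Int)) (d.getD ((c.toNat : Int)) 0 + 1)) PySem.Dict.empty
  match PySem.List.max? counts.keys (fun x => x), PySem.List.min? counts.keys (fun x => x) with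
  | some hi, some lo =>
      let out : List (List Char) :=
        (PySem.List.pyRange hi (lo - 1) (-1)).foldl
          (fun acc o => acc ++ [List.replicate ((counts.getD o 0).toNat) (Char.ofNat o.toNat)]) []
      String.mk out.flatten
  | _, _ => ""   -- unreachable: s is nonempty here, so counts has a key

-- ===== PRECONDITION & SPEC =====
def Spec_solution (s : String) (out : String) : Prop := out = solution_alt s
instance (s : String) (out : String) : Decidable (Spec_solution s out) := by unfold Spec_solution; infer_instance

-- ===== CLAIM (what is proved, stated in full; the proofs are below) =====
def Claim_equal_solution : Prop := ∀ (s : String), Dom_solution s → Spec_solution s (solution s)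

-- ===== LEMMAS AND PROOFS =====

-- Char facts
theorem char_toNat_inj {a b : Char} (h : a.toNat = b.toNat) : a = b := by
  apply Char.ext; exact UInt32.toNat_inj.mp h

def ordf (c : Char) : Int := (c.toNat : Int)

theorem ordf_inj : Function.Injective ordf := by
  intro a b h
  unfold ordf at h
  exact char_toNat_inj (by exact_mod_cast h)

-- the descending order both outputs satisfy
def Desc (a b : Char) : Prop := (b.toNat : Int) ≤ (a.toNat : Int)

theorem desc_unique {l₁ l₂ : List Char} (hp : l₁.Perm l₂)
    (h₁ : l₁.Pairwise Desc) (h₂ : l₂.Pairwise Desc) : l₁ = l₂ := by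
  apply PySem.List.eq_of_perm_of_pairwise_le_of_injective (key := fun c => -((c.toNat : Int)))
  · intro a b h
    exact char_toNat_inj (by simpa using h)
  · exact hp
  · exact h₁.imp (by intro a b h; simp [Desc] at h ⊢; omega)
  · exact h₂.imp (by intro a b h; simp [Desc] at h ⊢; omega)

-- ---------- A side ----------

def pairsOf (l : List Char) : List (Int × Char) := l.map (fun c => (((c.toNat : Int)), c))

def AL (l : List Char) : List Char :=
  (PySem.List.sorted (pairsOf l) (fun p => p.1) true).map (fun p => p.2)

-- insertBy defining equations
theorem insertBy_cons {α : Type} (b : α → α → Bool) (x y : α) (ys : List α) :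
    PySem.List.insertBy b x (y :: ys) =
      if b x y then x :: y :: ys else y :: PySem.List.insertBy b x ys := by
  simp [PySem.List.insertBy]

theorem insertBy_congr {α : Type} (b₁ b₂ : α → α → Bool) (x : α) (ys : List α)
    (h : ∀ y ∈ ys, b₁ x y = b₂ x y) :
    PySem.List.insertBy b₁ x ys = PySem.List.insertBy b₂ x ys := by
  induction ys with
  | nil => rfl
  | cons y ys ih =>
    rw [insertBy_cons, insertBy_cons, h y (by simp)]
    split_ifs with hb
    · rfl
    · rw [ih (fun z hz => h z (by simp [hz]))]

theorem foldl_insertBy_congr {α : Type} (b₁ b₂ : α → α → Bool) (P : α → Prop)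
    (hb : ∀ a b, P a → P b → b₁ a b = b₂ a b) :
    ∀ (l acc : List α), (∀ x ∈ l, P x) → (∀ x ∈ acc, P x) →
    l.foldl (fun acc x => PySem.List.insertBy b₁ x acc) acc =
      l.foldl (fun acc x => PySem.List.insertBy b₂ x acc) acc := by
  intro l
  induction l with
  | nil => intro acc _ _; rfl
  | cons x l ih =>
    intro acc hl hacc
    simp only [List.foldl_cons]
    rw [insertBy_congr b₁ b₂ x acc (fun y hy => hb x y (hl x (by simp)) (hacc y hy))]
    exact ih _ (fun z hz => hl z (by simp [hz]))
      (fun z hz => by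
        rcases (PySem.List.mem_insertBy _ _ _ _).mp hz with h | h
        · exact h ▸ hl x (by simp)
        · exact hacc z h)

def PKey (p : Int × Char) : Prop := p.1 = ((p.2.toNat : Int))

theorem before_agree (a b : Int × Char) (ha : PKey a) (hb : PKey b) :
    (decide (b.1 < a.1) || (!decide (a.1 < b.1) && decide (b.2 < a.2))) = decide (b.1 < a.1) := by
  by_cases h1 : b.1 < a.1
  · simp [h1]
  · by_cases h2 : a.1 < b.1
    · simp [h1, h2]
    · have : a.1 = b.1 := by omega
      have : a.2 = b.2 := by
        apply char_toNat_inj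
        have := ha.symm.trans (this.trans hb)
        exact_mod_cast this
      simp [h1, this]

theorem sorted2_eq_sorted (li : List (Int × Char)) (hP : ∀ p ∈ li, PKey p) :
    PySem.List.sorted2 li (fun p => p.1) (fun p => p.2) true =
      PySem.List.sorted li (fun p => p.1) true := by
  unfold PySem.List.sorted2 PySem.List.sorted
  simp only [reduceIte]
  exact foldl_insertBy_congr _ _ PKey
    (fun a b ha hb => before_agree a b ha hb) li [] hP (by simp)

theorem AL_eq (l : List Char) (hP : ∀ p ∈ pairsOf l, PKey p) :
    (PySem.List.sorted2 (pairsOf l) (fun p => p.1) (fun p => p.2) true).map (fun p => p.2) = AL l := by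
  unfold AL; rw [sorted2_eq_sorted _ hP]

theorem pairsOf_P (l : List Char) : ∀ p ∈ pairsOf l, PKey p := by
  intro p hp
  simp only [pairsOf, List.mem_map] at hp
  obtain ⟨c, _, rfl⟩ := hp
  rfl

theorem solution_eq (s : String) : solution s = String.mk (AL s.toList) := by
  unfold solution
  simp only [PySem.List.foldl_append_singleton_eq_map, List.nil_append]
  rw [show (s.toList.map fun c => (((c.toNat : Int)), c)) = pairsOf s.toList from rfl,
      AL_eq s.toList (pairsOf_P s.toList)]

theorem AL_perm (l : List Char) : (AL l).Perm l := by
  have h1 : (PySem.List.sorted (pairsOf l) (fun p => p.1) true).Perm (pairsOf l) :=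
    PySem.List.sorted_perm _ _ _
  have h2 := h1.map (fun p : Int × Char => p.2)
  have : (pairsOf l).map (fun p : Int × Char => p.2) = l := by
    simp [pairsOf, List.map_map, Function.comp_def]
  rw [this] at h2
  exact h2

theorem AL_desc (l : List Char) : (AL l).Pairwise Desc := by
  unfold AL
  rw [List.pairwise_map]
  have hpw := PySem.List.sorted_pairwise_rev (xs := pairsOf l) (key := fun p => p.1)
  refine hpw.imp_of_mem ?_
  intro a b ha hb h
  have hPa : PKey a := pairsOf_P l a ((PySem.List.mem_sorted _ _ _ _).mp ha)
  have hPb : PKey b := pairsOf_P l b ((PySem.List.mem_sorted _ _ _ _).mp hb)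
  unfold Desc
  rw [← hPa, ← hPb]
  exact h

-- ---------- B side ----------

def cnts (l : List Char) : PySem.Dict Int Int := PySem.Dict.counter (l.map ordf)

def BL (l : List Char) (hi lo : Int) : List Char :=
  (PySem.List.pyRange hi (lo - 1) (-1)).flatMap
    (fun o => List.replicate (((cnts l).getD o 0).toNat) (Char.ofNat o.toNat))

theorem counts_eq (l : List Char) :
    l.foldl (fun d c => d.insert ((c.toNat : Int)) (d.getD ((c.toNat : Int)) 0 + 1)) PySem.Dict.empty
      = cnts l := by
  unfold cnts
  rw [← PySem.Dict.foldl_insert_getD_add_one_eq_counter, List.foldl_map]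
  rfl

theorem keys_cnts (l : List Char) : (cnts l).keys = PySem.Set.ofList (l.map ordf) :=
  PySem.Dict.keys_counter _

theorem getD_cnts (l : List Char) (o : Int) : (cnts l).getD o 0 = ((l.map ordf).count o : Int) :=
  PySem.Dict.getD_counter _ _

theorem mem_keys_cnts (l : List Char) (c : Char) (hc : c ∈ l) : ordf c ∈ (cnts l).keys := by
  rw [keys_cnts, PySem.Set.mem_ofList]
  exact List.mem_map_of_mem hc

-- chr round-trips on the codes we scan: under Dom every code is ≤ 126 < 0xD800 (no surrogates)
theorem chr_toNat' {o : Int} (h0 : 0 ≤ o) (h1 : o ≤ 126) :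
    ((Char.ofNat o.toNat).toNat : Int) = o := by
  rw [Char.toNat_ofNat]
  have hv : o.toNat.isValidChar := Or.inl (by omega)
  simp [hv]; omega

theorem sum_map_if_unique (k : Int) (g : Int → Nat) :
    ∀ (l : List Int), l.Nodup →
      (l.map (fun o => if o = k then g o else 0)).sum = if k ∈ l then g k else 0 := by
  intro l
  induction l with
  | nil => simp
  | cons x l ih =>
    intro hnd
    rcases List.nodup_cons.mp hnd with ⟨hx, hnd'⟩
    by_cases hxk : x = k
    · subst hxk
      simp only [List.map_cons, List.sum_cons, List.mem_cons, true_or, if_pos]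
      rw [ih hnd']
      simp [hx]
    · simp only [List.map_cons, List.sum_cons, if_neg hxk]
      rw [ih hnd']
      simp [List.mem_cons, Ne.symm hxk]

theorem range_nodup (hi lo : Int) : (PySem.List.pyRange hi (lo - 1) (-1)).Nodup := by
  rw [PySem.List.pyRange_neg_one_eq_reverse]
  exact List.nodup_reverse.mpr (PySem.List.nodup_pyRange_one _ _)

theorem range_desc (hi lo : Int) :
    (PySem.List.pyRange hi (lo - 1) (-1)).Pairwise (fun a b => b < a) := by
  rw [PySem.List.pyRange_neg_one_eq_reverse]
  rw [List.pairwise_reverse]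
  exact PySem.List.pairwise_lt_pyRange_one _ _

theorem BL_desc (l : List Char) (hi lo : Int) (h0 : 0 ≤ lo) (h1 : hi ≤ 126) :
    (BL l hi lo).Pairwise Desc := by
  unfold BL
  rw [List.pairwise_flatMap]
  constructor
  · intro o _
    rw [List.pairwise_replicate]
    right; unfold Desc; omega
  · refine (range_desc hi lo).imp_of_mem ?_
    intro o₁ o₂ ho₁ ho₂ hlt x hx y hy
    rw [PySem.List.mem_pyRange_neg_one] at ho₁ ho₂
    have hx' := List.eq_of_mem_replicate hx
    have hy' := List.eq_of_mem_replicate hy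
    subst hx' hy'
    unfold Desc
    rw [chr_toNat' (by omega) (by omega), chr_toNat' (by omega) (by omega)]
    omega

theorem BL_count (l : List Char) (hi lo : Int)
    (hDom : ∀ c ∈ l, c.toNat ≤ 126)
    (hhi : PySem.List.max? (cnts l).keys (fun x => x) = some hi)
    (hlo : PySem.List.min? (cnts l).keys (fun x => x) = some lo)
    (c : Char) : (BL l hi lo).count c = l.count c := by
  have hhiM := PySem.List.max?_isMax hhi
  have hloM := PySem.List.min?_isMin hlo
  have hhi0 : 0 ≤ hi := by
    have := PySem.List.max?_mem hhi
    rw [keys_cnts, PySem.Set.mem_ofList] at this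
    obtain ⟨d, _, rfl⟩ := List.mem_map.mp this
    unfold ordf; positivity
  have hhi126 : hi ≤ 126 := by
    have := PySem.List.max?_mem hhi
    rw [keys_cnts, PySem.Set.mem_ofList] at this
    obtain ⟨d, hd, rfl⟩ := List.mem_map.mp this
    have := hDom d hd
    unfold ordf; exact_mod_cast this
  have hlo0 : 0 ≤ lo := by
    have := PySem.List.min?_mem hlo
    rw [keys_cnts, PySem.Set.mem_ofList] at this
    obtain ⟨d, _, rfl⟩ := List.mem_map.mp this
    unfold ordf; positivity
  unfold BL
  rw [List.flatMap_def, List.count_flatten, List.map_map]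
  have hmc : ∀ o ∈ PySem.List.pyRange hi (lo - 1) (-1),
      (List.count c ∘ fun o => List.replicate (((cnts l).getD o 0).toNat) (Char.ofNat o.toNat)) o
        = (fun o => if o = ordf c then ((cnts l).getD o 0).toNat else 0) o := by
    intro o ho
    rw [PySem.List.mem_pyRange_neg_one] at ho
    simp only [Function.comp_apply, List.count_replicate]
    by_cases heq : Char.ofNat o.toNat = c
    · have : o = ordf c := by
        unfold ordf
        rw [← heq, chr_toNat' (by omega) (by omega)]
      subst this
      simp [heq]
    · have : ¬ (o = ordf c) := by
        intro hoc
        apply heq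
        apply char_toNat_inj
        have := chr_toNat' (o := o) (by omega) (by omega)
        unfold ordf at hoc
        omega
      simp [heq, this]
  rw [List.map_congr_left hmc, sum_map_if_unique _ _ _ (range_nodup hi lo)]
  by_cases hc : c ∈ l
  · have hk : ordf c ∈ (cnts l).keys := mem_keys_cnts l c hc
    have hin : ordf c ∈ PySem.List.pyRange hi (lo - 1) (-1) := by
      rw [PySem.List.mem_pyRange_neg_one]
      exact ⟨by have := hloM _ hk; omega, hhiM _ hk⟩
    rw [if_pos hin, getD_cnts]
    rw [show ((l.map ordf).count (ordf c) : Int).toNat = (l.map ordf).count (ordf c) from by omega]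
    exact List.count_map_of_injective l ordf ordf_inj c
  · have hc0 : l.count c = 0 := List.count_eq_zero.mpr hc
    split_ifs with hin
    · rw [getD_cnts, hc0]
      rw [List.count_map_of_injective l ordf ordf_inj c, hc0]
      rfl
    · omega

theorem BL_perm (l : List Char) (hi lo : Int)
    (hDom : ∀ c ∈ l, c.toNat ≤ 126)
    (hhi : PySem.List.max? (cnts l).keys (fun x => x) = some hi)
    (hlo : PySem.List.min? (cnts l).keys (fun x => x) = some lo) :
    (BL l hi lo).Perm l :=
  List.perm_iff_count.mpr (BL_count l hi lo hDom hhi hlo)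

-- Dom gives the 126 bound
theorem dom_le (s : String) (hD : Dom_solution s) : ∀ c ∈ s.toList, c.toNat ≤ 126 := by
  intro c hc
  unfold Dom_solution pvDomStr at hD
  rw [List.all_eq_true] at hD
  have := hD c hc
  unfold pvDomChar at this
  simp at this
  omega

-- ===== VERDICT (by name: the statement is the Claim_ definition above) =====
theorem solution_spec : Claim_equal_solution := by
  unfold Claim_equal_solution
  intro s hD
  unfold Spec_solution
  by_cases hnil : s.toList = []
  · rw [solution_eq]
    unfold solution_alt
    rw [if_pos hnil, hnil]
    rfl
  · have hDom := dom_le s hD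
    -- the keys list of the counter is nonempty
    have hk : (cnts s.toList).keys ≠ [] := by
      obtain ⟨c, hc⟩ := List.exists_mem_of_ne_nil _ hnil
      intro h
      have := mem_keys_cnts s.toList c hc
      rw [h] at this
      exact List.not_mem_nil this
    obtain ⟨hi, hhi⟩ : ∃ hi, PySem.List.max? (cnts s.toList).keys (fun x => x) = some hi := by
      rcases h : PySem.List.max? (cnts s.toList).keys (fun x => x) with _ | hi
      · exact absurd ((PySem.List.max?_eq_none_iff _ _).mp h) hk
      · exact ⟨hi, rfl⟩
    obtain ⟨lo, hlo⟩ : ∃ lo, PySem.List.min? (cnts s.toList).keys (fun x => x) = some lo := by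
      rcases h : PySem.List.min? (cnts s.toList).keys (fun x => x) with _ | lo
      · exact absurd ((PySem.List.min?_eq_none_iff _ _).mp h) hk
      · exact ⟨lo, rfl⟩
    have hBalt : solution_alt s = String.mk (BL s.toList hi lo) := by
      unfold solution_alt
      rw [if_neg hnil]
      simp only [counts_eq, hhi, hlo]
      rw [PySem.List.foldl_append_singleton_eq_map, List.nil_append, ← List.flatMap_def]
      rfl
    rw [solution_eq, hBalt]
    congr 1
    have hhi126 : hi ≤ 126 := by
      have := PySem.List.max?_mem hhi
      rw [keys_cnts, PySem.Set.mem_ofList] at this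
      obtain ⟨d, hd, rfl⟩ := List.mem_map.mp this
      have := hDom d hd
      unfold ordf; exact_mod_cast this
    have hlo0 : 0 ≤ lo := by
      have := PySem.List.min?_mem hlo
      rw [keys_cnts, PySem.Set.mem_ofList] at this
      obtain ⟨d, _, rfl⟩ := List.mem_map.mp this
      unfold ordf; positivity
    exact desc_unique
      ((AL_perm s.toList).trans (BL_perm s.toList hi lo hDom hhi hlo).symm)
      (AL_desc s.toList)
      (BL_desc s.toList hi lo hlo0 hhi126)
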